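-- pv_equiv track=rewrite | github.com/Zaaees/Citadelle-2.0 | cog/inventaire.py | format_student_list
-- ===== SOURCE A (Python) =====
-- def format_student_list(students):
--     def get_year(medals):
--         if 0 <= medals < 7:
--             return "Première années"
--         elif 7 <= medals < 18:
--             return "Deuxième années"
--         elif 18 <= medals < 30:
--             return "Troisième années"
--         else:
--             return "Quatrième années"
--
--     sorted_students = sorted(students.items(), key=lambda x: x[1], reverse=True)
--     years = {"Quatrième années": [], "Troisième années": [], "Deuxième années": [], "Première années": []}
--
--     for name, medals in sorted_students:
--         year = get_year(medals)
--         years[year].append(f"  - ***{name} :** {medals} médailles*")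
--
--     message = "## ✮ Liste des personnages et leurs médailles ✮\n** **\n"
--     for i, (year, students_list) in enumerate(years.items()):
--         if students_list:
--             message += f"- **{year} :**\n" + "\n".join(students_list)
--             if i < len(years) - 1:
--                 message += "\n\n"
--             else:
--                 message += "\n"
--
--     return message.rstrip()
-- ===== SOURCE B (Python) =====
-- def format_student_list(students):
--     def get_year(medals):
--         if 0 <= medals < 7:
--             return "Première années"
--         elif 7 <= medals < 18:
--             return "Deuxième années"
--         elif 18 <= medals < 30:
--             return "Troisième années"
--         else:
--             return "Quatrième années"
--
--     items = list(students.items())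
--     sections = []
--     for year in ("Quatrième années", "Troisième années", "Deuxième années", "Première années"):
--         group = sorted([s for s in items if get_year(s[1]) == year],
--                        key=lambda s: s[1], reverse=True)
--         if group:
--             sections.append(f"- **{year} :**\n"
--                             + "\n".join(f"  - ***{name} :** {medals} médailles*"
--                                         for name, medals in group))
--     header = "## ✮ Liste des personnages et leurs médailles ✮\n** **\n"
--     return (header + "\n\n".join(sections)).rstrip()
-- ===== Notes on version B (the rewrite author's own statement) =====
-- stated objective: simpler
-- what changed: B drops A's global descending sort, dict-of-buckets and index-driven separator bookkeeping: it filters each year's group out of the dict items, sorts each group independently (stable, key=medals, reverse=True), and joins the non-empty sections with '\n\n' before one final rstrip.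
import Mathlib
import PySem

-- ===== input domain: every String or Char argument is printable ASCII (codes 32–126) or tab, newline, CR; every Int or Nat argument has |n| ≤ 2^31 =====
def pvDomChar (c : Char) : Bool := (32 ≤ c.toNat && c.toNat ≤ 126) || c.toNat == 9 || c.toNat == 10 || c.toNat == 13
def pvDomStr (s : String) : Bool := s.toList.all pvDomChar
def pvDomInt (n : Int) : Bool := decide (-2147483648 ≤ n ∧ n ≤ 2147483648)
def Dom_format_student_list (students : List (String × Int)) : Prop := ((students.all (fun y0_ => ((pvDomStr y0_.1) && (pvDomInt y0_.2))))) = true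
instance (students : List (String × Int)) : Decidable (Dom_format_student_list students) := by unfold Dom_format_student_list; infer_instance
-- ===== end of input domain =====

-- B restructures A: instead of one global descending sort followed by bucketing into a dict and an
-- index-driven separator accumulation, B filters each year's group, sorts it independently, and joins
-- the non-empty sections with "\n\n" (objective: simpler decomposition; same exact output).

-- ===== PORT A =====
def pvGetYearA (medals : Int) : String :=
  if 0 ≤ medals ∧ medals < 7 then "Première années"
  else if 7 ≤ medals ∧ medals < 18 then "Deuxième années"
  else if 18 ≤ medals ∧ medals < 30 then "Troisième années"
  else "Quatrième années"

def pvLineA (x : String × Int) : String :=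
  "  - ***" ++ x.1 ++ " :** " ++ PySem.Int.toStr x.2 ++ " médailles*"

def format_student_list (students : List (String × Int)) : String :=
  let sorted_students := PySem.List.sorted (PySem.Dict.ofList students).items (fun x => x.2) true
  let years0 : PySem.Dict String (List String) :=
    PySem.Dict.ofList [("Quatrième années", []), ("Troisième années", []),
                       ("Deuxième années", []), ("Première années", [])]
  -- years[year].append(line): year is always a key of years, so modify (default [] unused) is exact
  let years := sorted_students.foldl
    (fun d x => d.modify (pvGetYearA x.2) [] (fun l => l ++ [pvLineA x])) years0
  let message := "## ✮ Liste des personnages et leurs médailles ✮\n** **\n"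
  let message := (PySem.List.enumerate years.items).foldl
    (fun msg iy =>
      if iy.2.2 ≠ [] then
        let m := msg ++ "- **" ++ iy.2.1 ++ " :**\n" ++ PySem.Str.join "\n" iy.2.2
        if iy.1 < (years.items.length : Int) - 1 then m ++ "\n\n" else m ++ "\n"
      else msg) message
  PySem.Str.rstrip message

-- ===== PORT B =====
def pvGetYearB (medals : Int) : String :=
  if 0 ≤ medals ∧ medals < 7 then "Première années"
  else if 7 ≤ medals ∧ medals < 18 then "Deuxième années"
  else if 18 ≤ medals ∧ medals < 30 then "Troisième années"
  else "Quatrième années"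

def pvLineB (x : String × Int) : String :=
  "  - ***" ++ x.1 ++ " :** " ++ PySem.Int.toStr x.2 ++ " médailles*"

def format_student_list_alt (students : List (String × Int)) : String :=
  let items := (PySem.Dict.ofList students).items
  let sections := ["Quatrième années", "Troisième années", "Deuxième années", "Première années"].foldl
    (fun secs year =>
      let group := PySem.List.sorted (items.filter (fun s => pvGetYearB s.2 == year)) (fun s => s.2) true
      if group ≠ [] then
        secs ++ ["- **" ++ year ++ " :**\n" ++ PySem.Str.join "\n" (group.map pvLineB)]
      else secs) []
  PySem.Str.rstrip ("## ✮ Liste des personnages et leurs médailles ✮\n** **\n" ++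
    PySem.Str.join "\n\n" sections)

-- ===== PRECONDITION & SPEC =====
def Spec_format_student_list (students : List (String × Int)) (out : String) : Prop := out = format_student_list_alt students
instance (students : List (String × Int)) (out : String) : Decidable (Spec_format_student_list students out) := by unfold Spec_format_student_list; infer_instance

-- ===== CLAIM (what is proved, stated in full; the proofs are below) =====
def Claim_equal_format_student_list : Prop := ∀ (students : List (String × Int)), Dom_format_student_list students → Spec_format_student_list students (format_student_list students)

-- ===== LEMMAS AND PROOFS =====

-- the insertion step of PySem.List.sorted (.., reverse := true) with key  x.2
def pvIns (acc : List (String × Int)) (x : String × Int) : List (String × Int) :=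
  PySem.List.insertBy (fun a b => decide (b.2 < a.2)) x acc

lemma pv_insertBy_head_lt (x : String × Int) (l : List (String × Int))
    (h : ∀ z ∈ l, z.2 < x.2) :
    PySem.List.insertBy (fun a b => decide (b.2 < a.2)) x l = x :: l := by
  cases l with
  | nil => simp [PySem.List.insertBy]
  | cons y ys => simp [PySem.List.insertBy, h y (by simp)]

lemma pv_insertBy_pairwise (x : String × Int) (l : List (String × Int))
    (h : l.Pairwise (fun a b : String × Int => b.2 ≤ a.2)) :
    (PySem.List.insertBy (fun a b => decide (b.2 < a.2)) x l).Pairwise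
      (fun a b : String × Int => b.2 ≤ a.2) := by
  induction l with
  | nil => simp [PySem.List.insertBy]
  | cons y ys ih =>
    rcases List.pairwise_cons.mp h with ⟨hy, hys⟩
    by_cases hxy : y.2 < x.2
    · simp only [PySem.List.insertBy, hxy, decide_true, if_true]
      refine List.pairwise_cons.mpr ⟨?_, h⟩
      intro z hz
      rcases List.mem_cons.mp hz with rfl | hz
      · exact le_of_lt hxy
      · exact le_trans (hy z hz) (le_of_lt hxy)
    · simp only [PySem.List.insertBy, hxy, decide_false]
      refine List.pairwise_cons.mpr ⟨?_, ih hys⟩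
      intro z hz
      rcases (PySem.List.mem_insertBy _ x z ys).mp hz with hz | hz
      · exact hz ▸ le_of_not_gt hxy
      · exact hy z hz

lemma pv_filter_insertBy (p : String × Int → Bool) (x : String × Int) (l : List (String × Int))
    (h : l.Pairwise (fun a b : String × Int => b.2 ≤ a.2)) :
    (PySem.List.insertBy (fun a b => decide (b.2 < a.2)) x l).filter p
      = if p x then PySem.List.insertBy (fun a b => decide (b.2 < a.2)) x (l.filter p)
        else l.filter p := by
  induction l with
  | nil => cases hp : p x <;> simp [PySem.List.insertBy, List.filter, hp]
  | cons y ys ih =>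
    rcases List.pairwise_cons.mp h with ⟨hy, hys⟩
    by_cases hxy : y.2 < x.2
    · -- x is inserted right before y; every element of ys is also < x.2
      have hall : ∀ z ∈ ys.filter p, z.2 < x.2 := by
        intro z hz
        exact lt_of_le_of_lt (hy z (List.mem_of_mem_filter hz)) hxy
      simp only [PySem.List.insertBy, hxy, decide_true, if_true]
      cases hp : p x <;> cases hpy : p y <;>
        simp [List.filter, hp, hpy, PySem.List.insertBy, pv_insertBy_head_lt x _ hall, hxy]
    · simp only [PySem.List.insertBy, hxy, decide_false]
      cases hp : p x <;> cases hpy : p y <;>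
        simp [List.filter, hp, hpy, ih hys, PySem.List.insertBy, hxy]

lemma pv_filter_foldl (p : String × Int → Bool) (xs acc : List (String × Int))
    (h : acc.Pairwise (fun a b : String × Int => b.2 ≤ a.2)) :
    (xs.foldl pvIns acc).filter p = (xs.filter p).foldl pvIns (acc.filter p) := by
  induction xs generalizing acc with
  | nil => simp
  | cons x t ih =>
    have hnext : (pvIns acc x).Pairwise (fun a b : String × Int => b.2 ≤ a.2) :=
      pv_insertBy_pairwise x acc h
    rw [List.foldl_cons, ih (pvIns acc x) hnext]
    show _ = (List.filter p (x :: t)).foldl pvIns (acc.filter p)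
    cases hp : p x <;>
      simp [pvIns, pv_filter_insertBy p x acc h, hp]

lemma pv_filter_sorted (p : String × Int → Bool) (xs : List (String × Int)) :
    (PySem.List.sorted xs (fun x => x.2) true).filter p
      = PySem.List.sorted (xs.filter p) (fun x => x.2) true := by
  rw [PySem.List.sorted_rev_eq_foldl_insertBy, PySem.List.sorted_rev_eq_foldl_insertBy]
  simpa [pvIns] using pv_filter_foldl p xs [] (by simp)

-- characterisation of A's bucketing loop over the four-key years dict
lemma pv_buckets (l : List (String × Int)) (q t w p : List String) :
    (l.foldl (fun d x => d.modify (pvGetYearA x.2) [] (fun acc => acc ++ [pvLineA x]))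
        (PySem.Dict.mk [("Quatrième années", q), ("Troisième années", t),
                        ("Deuxième années", w), ("Première années", p)])).items
      = [("Quatrième années", q ++ (l.filter (fun x => pvGetYearA x.2 == "Quatrième années")).map pvLineA),
         ("Troisième années", t ++ (l.filter (fun x => pvGetYearA x.2 == "Troisième années")).map pvLineA),
         ("Deuxième années", w ++ (l.filter (fun x => pvGetYearA x.2 == "Deuxième années")).map pvLineA),
         ("Première années", p ++ (l.filter (fun x => pvGetYearA x.2 == "Première années")).map pvLineA)] := by
  induction l generalizing q t w p with
  | nil => simp
  | cons x xs ih =>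
    rw [List.foldl_cons]
    by_cases h1 : 0 ≤ x.2 ∧ x.2 < 7
    · have hy : pvGetYearA x.2 = "Première années" := by simp [pvGetYearA, h1]
      have hstep : (PySem.Dict.mk [("Quatrième années", q), ("Troisième années", t),
            ("Deuxième années", w), ("Première années", p)]).modify (pvGetYearA x.2) []
            (fun acc => acc ++ [pvLineA x])
          = PySem.Dict.mk [("Quatrième années", q), ("Troisième années", t),
            ("Deuxième années", w), ("Première années", p ++ [pvLineA x])] := by
        rw [hy]
        simp [PySem.Dict.modify, PySem.Dict.insert, PySem.Dict.getD, PySem.Dict.get?,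
          PySem.Dict.contains, List.find?, List.any]
      rw [hstep, ih]
      simp [hy]
    · by_cases h2 : 7 ≤ x.2 ∧ x.2 < 18
      · have hy : pvGetYearA x.2 = "Deuxième années" := by simp [pvGetYearA, h1, h2]
        have hstep : (PySem.Dict.mk [("Quatrième années", q), ("Troisième années", t),
              ("Deuxième années", w), ("Première années", p)]).modify (pvGetYearA x.2) []
              (fun acc => acc ++ [pvLineA x])
            = PySem.Dict.mk [("Quatrième années", q), ("Troisième années", t),
              ("Deuxième années", w ++ [pvLineA x]), ("Première années", p)] := by
          rw [hy]
          simp [PySem.Dict.modify, PySem.Dict.insert, PySem.Dict.getD, PySem.Dict.get?,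
            PySem.Dict.contains, List.find?, List.any]
        rw [hstep, ih]
        simp [hy]
      · by_cases h3 : 18 ≤ x.2 ∧ x.2 < 30
        · have hy : pvGetYearA x.2 = "Troisième années" := by simp [pvGetYearA, h1, h2, h3]
          have hstep : (PySem.Dict.mk [("Quatrième années", q), ("Troisième années", t),
                ("Deuxième années", w), ("Première années", p)]).modify (pvGetYearA x.2) []
                (fun acc => acc ++ [pvLineA x])
              = PySem.Dict.mk [("Quatrième années", q), ("Troisième années", t ++ [pvLineA x]),
                ("Deuxième années", w), ("Première années", p)] := by
            rw [hy]
            simp [PySem.Dict.modify, PySem.Dict.insert, PySem.Dict.getD, PySem.Dict.get?,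
              PySem.Dict.contains, List.find?, List.any]
          rw [hstep, ih]
          simp [hy]
        · have hy : pvGetYearA x.2 = "Quatrième années" := by simp [pvGetYearA, h1, h2, h3]
          have hstep : (PySem.Dict.mk [("Quatrième années", q), ("Troisième années", t),
                ("Deuxième années", w), ("Première années", p)]).modify (pvGetYearA x.2) []
                (fun acc => acc ++ [pvLineA x])
              = PySem.Dict.mk [("Quatrième années", q ++ [pvLineA x]), ("Troisième années", t),
                ("Deuxième années", w), ("Première années", p)] := by
            rw [hy]
            simp [PySem.Dict.modify, PySem.Dict.insert, PySem.Dict.getD, PySem.Dict.get?,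
              PySem.Dict.contains, List.find?, List.any]
          rw [hstep, ih]
          simp [hy]

lemma pv_rstrip_app (s w : String) (hw : w.toList.all PySem.Chars.isspace = true) :
    PySem.Str.rstrip (s ++ w) = PySem.Str.rstrip s := by
  have hdrop : List.dropWhile PySem.Chars.isspace w.toList.reverse = [] := by
    rw [List.dropWhile_eq_nil_iff]
    intro x hx
    exact List.all_eq_true.mp hw x (List.mem_reverse.mp hx)
  simp [PySem.Str.rstrip, PySem.Chars.rstrip, String.toList_append,
    List.reverse_append, List.dropWhile_append, hdrop]

-- ===== VERDICT (by name: the statement is the Claim_ definition above) =====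
set_option maxHeartbeats 1000000 in
set_option maxRecDepth 8192 in
theorem format_student_list_spec : Claim_equal_format_student_list := by
  intro students _
  unfold Spec_format_student_list format_student_list format_student_list_alt
  have hdict : (PySem.Dict.ofList [("Quatrième années", ([]:List String)), ("Troisième années", []),
                       ("Deuxième années", []), ("Première années", [])])
      = PySem.Dict.mk [("Quatrième années", []), ("Troisième années", []),
                        ("Deuxième années", []), ("Première années", [])] := by decide
  have hyear : pvGetYearB = pvGetYearA := rfl
  have hline : pvLineB = pvLineA := rfl
  simp only [hdict, hyear, hline, pv_buckets, pv_filter_sorted, List.nil_append]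
  simp only [List.foldl_cons, List.foldl_nil]
  generalize (PySem.List.sorted
      (List.filter (fun x => pvGetYearA x.2 == "Quatrième années") (PySem.Dict.ofList students).items)
      (fun x => x.2) true) = G4
  generalize (PySem.List.sorted
      (List.filter (fun x => pvGetYearA x.2 == "Troisième années") (PySem.Dict.ofList students).items)
      (fun x => x.2) true) = G3
  generalize (PySem.List.sorted
      (List.filter (fun x => pvGetYearA x.2 == "Deuxième années") (PySem.Dict.ofList students).items)
      (fun x => x.2) true) = G2
  generalize (PySem.List.sorted
      (List.filter (fun x => pvGetYearA x.2 == "Première années") (PySem.Dict.ofList students).items)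
      (fun x => x.2) true) = G1
  simp only [PySem.List.enumerate, List.foldl_cons, List.foldl_nil, List.length_cons,
    List.length_nil, ne_eq, List.map_eq_nil_iff]
  norm_num
  by_cases h1 : G1 = [] <;> by_cases h2 : G2 = [] <;> by_cases h3 : G3 = [] <;>
  by_cases h4 : G4 = [] <;>
  simp only [h1, h2, h3, h4, if_true, if_false] <;>
  first
  | (rw [pv_rstrip_app _ "\n" (by decide)]; refine congrArg PySem.Str.rstrip ?_; rw [← String.toList_inj];
     simp [String.toList_append, PySem.Str.join, PySem.Chars.join, List.intercalate,
       List.intersperse, List.map, List.flatten])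
  | (rw [pv_rstrip_app _ "\n\n" (by decide)]; refine congrArg PySem.Str.rstrip ?_; rw [← String.toList_inj];
     simp [String.toList_append, PySem.Str.join, PySem.Chars.join, List.intercalate,
       List.intersperse, List.map, List.flatten])
  | (rw [show PySem.Str.join "\n\n" ([] : List String) = "" from rfl];
     refine congrArg PySem.Str.rstrip ?_; rw [← String.toList_inj]; simp)
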